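-- pv_equiv track=rewrite | github.com/ikamal97/job-search-skills | job-search-toolkit/Templates/simple_template_processor.py | condense_summary
-- ===== SOURCE A (Python) =====
-- from typing import Optional, Dict, List
--
-- def condense_summary(tailored_data: Dict, max_sentences: int = 2) -> bool:
--     """Condense summary to max_sentences. Returns True if condensed."""
--     summary = tailored_data.get("summary", "")
--     if not summary:
--         return False
--
--     # Split into sentences
--     sentences = []
--     current = ""
--     for char in summary:
--         current += char
--         if char in ".!?" and len(current.strip()) > 10:
--             sentences.append(current.strip())
--             current = ""
--     if current.strip():
--         sentences.append(current.strip())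
--
--     if len(sentences) <= max_sentences:
--         return False
--
--     # Keep first max_sentences (usually the most important)
--     tailored_data["summary"] = " ".join(sentences[:max_sentences])
--     return True
-- ===== SOURCE B (Python) =====
-- def _next_cut(s):
--     """Index of the first char of s that ends a sentence: a '.!?' whose
--     stripped prefix (up to and including it) is longer than 10; None if none."""
--     for i, ch in enumerate(s):
--         if ch in ".!?" and len(s[:i + 1].strip()) > 10:
--             return i
--     return None
--
--
-- def condense_summary(tailored_data, max_sentences=2):
--     """Condense summary to max_sentences. Returns True if condensed.
--
--     Cut-point decomposition: repeatedly find the next sentence-ending index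
--     in the remaining text and slice the sentence off; no running buffer.
--     """
--     summary = tailored_data.get("summary", "")
--     if not summary:
--         return False
--
--     sentences = []
--     rest = summary
--     while True:
--         cut = _next_cut(rest)
--         if cut is None:
--             break
--         sentences.append(rest[:cut + 1].strip())
--         rest = rest[cut + 1:]
--     tail = rest.strip()
--     if tail:
--         sentences.append(tail)
--
--     if len(sentences) <= max_sentences:
--         return False
--
--     tailored_data["summary"] = " ".join(sentences[:max_sentences])
--     return True
-- ===== Notes on version B (the rewrite author's own statement) =====
-- stated objective: alternative
-- what changed: Replaces A's single char-by-char loop with a running buffer by a cut-point search: a helper scans the remaining text for the first '.!?' index whose stripped prefix exceeds 10 chars, and an outer loop slices the sentence off and restarts on the remainder, with no accumulator state.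
import Mathlib
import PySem

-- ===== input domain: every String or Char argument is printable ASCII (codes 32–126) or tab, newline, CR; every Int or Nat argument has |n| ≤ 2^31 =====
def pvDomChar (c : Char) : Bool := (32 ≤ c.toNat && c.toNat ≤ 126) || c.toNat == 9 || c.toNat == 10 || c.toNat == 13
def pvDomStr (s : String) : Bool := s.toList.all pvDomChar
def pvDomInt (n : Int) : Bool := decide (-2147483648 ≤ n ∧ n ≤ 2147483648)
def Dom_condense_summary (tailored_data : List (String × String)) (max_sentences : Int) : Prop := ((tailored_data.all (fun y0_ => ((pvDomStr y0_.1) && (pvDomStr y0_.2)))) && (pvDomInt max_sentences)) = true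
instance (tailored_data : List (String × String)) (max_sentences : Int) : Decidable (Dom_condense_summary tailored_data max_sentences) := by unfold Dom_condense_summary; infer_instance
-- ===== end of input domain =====

-- B replaces A's buffer-accumulating char loop by a cut-point search with slicing
-- (alternative decomposition); A mutates the dict in place and the equivalence proved
-- here is about the RETURN value only (B performs the same mutation in Python).

-- ===== PORT A =====
-- is ch one of '.', '!', '?'
def pvTerm (c : Char) : Bool := c == '.' || c == '!' || c == '?'

-- A's loop body: current += char; if char in ".!?" and len(current.strip()) > 10: push
def pvAStep (st : List (List Char) × List Char) (c : Char) : List (List Char) × List Char :=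
  let cur := st.2 ++ [c]
  if pvTerm c && (PySem.Chars.strip cur).length > 10 then
    (st.1 ++ [PySem.Chars.strip cur], [])
  else (st.1, cur)

def condense_summary (tailored_data : List (String × String)) (max_sentences : Int) : Bool :=
  let summary := ((tailored_data.lookup "summary").getD "").toList
  if summary.isEmpty then false
  else
    let st := summary.foldl pvAStep ([], [])
    let sentences :=
      if (PySem.Chars.strip st.2).isEmpty then st.1 else st.1 ++ [PySem.Chars.strip st.2]
    -- the dict mutation does not affect the returned bool
    decide (¬ ((sentences.length : Int) ≤ max_sentences))

-- ===== PORT B =====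
-- _next_cut's scan, carried with the already-passed prefix `pre`; returns the
-- sentence slice s[:i+1] (as pre ++ …) together with the remainder s[i+1:]
def pvNextCut (pre : List Char) (s : List Char) : Option (List Char × List Char) :=
  match s with
  | [] => none
  | c :: rest =>
      let p := pre ++ [c]
      if pvTerm c && (PySem.Chars.strip p).length > 10 then some (p, rest)
      else pvNextCut p rest

-- termination fact for the outer while loop: the remainder strictly shrinks
theorem pvNextCut_some_lt (s : List Char) : ∀ (pre p rest : List Char),
    pvNextCut pre s = some (p, rest) → rest.length < s.length := by
  induction s with
  | nil => intro pre p rest h; simp [pvNextCut] at h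
  | cons c t ih =>
      intro pre p rest h
      simp only [pvNextCut] at h
      split at h
      · cases h; simp
      · exact Nat.lt_trans (ih _ _ _ h) (by simp)

-- B's outer while loop: slice off the next sentence, restart on the remainder
def pvSplit (s : List Char) : List (List Char) :=
  match h : pvNextCut [] s with
  | some pr => PySem.Chars.strip pr.1 :: pvSplit pr.2
  | none =>
      let t := PySem.Chars.strip s
      if t.isEmpty then [] else [t]
termination_by s.length
decreasing_by exact pvNextCut_some_lt s [] pr.1 pr.2 h

def condense_summary_alt (tailored_data : List (String × String)) (max_sentences : Int) : Bool :=
  let summary := ((tailored_data.lookup "summary").getD "").toList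
  if summary.isEmpty then false
  else
    let sentences := pvSplit summary
    decide (¬ ((sentences.length : Int) ≤ max_sentences))

-- ===== PRECONDITION & SPEC =====
def Spec_condense_summary (tailored_data : List (String × String)) (max_sentences : Int) (out : Bool) : Prop := out = condense_summary_alt tailored_data max_sentences
instance (tailored_data : List (String × String)) (max_sentences : Int) (out : Bool) : Decidable (Spec_condense_summary tailored_data max_sentences out) := by unfold Spec_condense_summary; infer_instance

-- ===== CLAIM (what is proved, stated in full; the proofs are below) =====
def Claim_equal_condense_summary : Prop := ∀ (tailored_data : List (String × String)) (max_sentences : Int), Dom_condense_summary tailored_data max_sentences → Spec_condense_summary tailored_data max_sentences (condense_summary tailored_data max_sentences)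

-- ===== LEMMAS AND PROOFS =====

-- appending text to the scanned region: a cut found in s stands; otherwise the scan
-- continues into t with the prefix advanced past s
theorem pvNextCut_append (s : List Char) : ∀ (pre t : List Char),
    pvNextCut pre (s ++ t) =
      (match pvNextCut pre s with
       | some (p, rest) => some (p, rest ++ t)
       | none => pvNextCut (pre ++ s) t) := by
  induction s with
  | nil => intro pre t; simp [pvNextCut]
  | cons c u ih =>
      intro pre t
      simp only [List.cons_append, pvNextCut]
      split
      · rfl
      · rw [ih]; simp

-- A's finishing step
def pvFinish (st : List (List Char) × List Char) : List (List Char) :=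
  if (PySem.Chars.strip st.2).isEmpty then st.1 else st.1 ++ [PySem.Chars.strip st.2]

-- main invariant: A's loop over the remaining chars L, with pending buffer cur in
-- which no cut fires, produces acc ++ B's cut-point split of cur ++ L
theorem pvMain (L : List Char) : ∀ (cur : List Char) (acc : List (List Char)),
    pvNextCut [] cur = none →
    pvFinish (L.foldl pvAStep (acc, cur)) = acc ++ pvSplit (cur ++ L) := by
  induction L with
  | nil =>
      intro cur acc H
      rw [List.append_nil, pvSplit, H]
      simp only [List.foldl_nil, pvFinish]
      split <;> simp
  | cons c rest ih =>
      intro cur acc H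
      have hsplit : pvNextCut [] (cur ++ (c :: rest)) = pvNextCut cur (c :: rest) := by
        rw [pvNextCut_append, H]; simp
      simp only [List.foldl_cons, pvAStep]
      by_cases hc : (pvTerm c && (PySem.Chars.strip (cur ++ [c])).length > 10 : Bool) = true
      · rw [if_pos hc]
        have hcut : pvNextCut [] (cur ++ (c :: rest)) = some (cur ++ [c], rest) := by
          rw [hsplit]
          simp only [pvNextCut]
          rw [if_pos hc]
        rw [pvSplit, hcut]
        rw [ih [] (acc ++ [PySem.Chars.strip (cur ++ [c])]) (by simp [pvNextCut])]
        simp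
      · rw [if_neg hc]
        have H' : pvNextCut [] (cur ++ [c]) = none := by
          rw [pvNextCut_append, H]
          simp [pvNextCut, hc]
        rw [ih (cur ++ [c]) acc H']
        simp

-- ===== VERDICT (by name: the statement is the Claim_ definition above) =====
theorem condense_summary_spec : Claim_equal_condense_summary := by
  intro td m _
  unfold Spec_condense_summary condense_summary condense_summary_alt
  by_cases h : (((td.lookup "summary").getD "").toList).isEmpty
  · simp [h]
  · rw [if_neg h, if_neg h]
    have := pvMain (((td.lookup "summary").getD "").toList) [] [] (by simp [pvNextCut])
    simp only [pvFinish, List.nil_append] at this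
    simp only [← this]
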